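-- pv_equiv track=rewrite | github.com/YuvalGerzii/one_colsilidated_app | labor_transofrmation/Labor-market-disruption-inequality/backend/app/models/skill_graph.py | _determine_career_stage
-- ===== SOURCE A (Python) =====
-- from typing import Dict, List, Tuple, Set
--
-- def _determine_career_stage(job_history: List[Dict]) -> str:
--     """Determine career stage from history"""
--     total_years = sum(job.get('years', 0) for job in job_history)
--
--     if total_years < 3:
--         return 'Early Career'
--     elif total_years < 8:
--         return 'Mid Career'
--     elif total_years < 15:
--         return 'Senior'
--     else:
--         return 'Expert'
-- ===== SOURCE B (Python) =====
-- def _determine_career_stage(job_history):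
--     """Determine career stage from history.
--
--     Instead of totalling the years and then scanning an if/elif chain,
--     maintain, per stage, the residual years still needed to reach it;
--     each job's years are subtracted from every residual, and the final
--     stage is the last one whose residual has dropped to zero or below.
--     """
--     remaining = [('Mid Career', 3), ('Senior', 8), ('Expert', 15)]
--     for job in job_history:
--         y = job.get('years', 0)
--         remaining = [(stage, r - y) for stage, r in remaining]
--     label = 'Early Career'
--     for stage, r in remaining:
--         if r <= 0:
--             label = stage
--     return label
-- ===== Notes on version B (the rewrite author's own statement) =====
-- stated objective: alternative
-- what changed: B never forms the running total: it maintains per-stage residuals (years still needed to reach each stage), subtracting each job's years from all residuals in one pass, and returns the last stage whose residual is non-positive; A sums years and walks an if/elif threshold chain.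
import Mathlib
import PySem

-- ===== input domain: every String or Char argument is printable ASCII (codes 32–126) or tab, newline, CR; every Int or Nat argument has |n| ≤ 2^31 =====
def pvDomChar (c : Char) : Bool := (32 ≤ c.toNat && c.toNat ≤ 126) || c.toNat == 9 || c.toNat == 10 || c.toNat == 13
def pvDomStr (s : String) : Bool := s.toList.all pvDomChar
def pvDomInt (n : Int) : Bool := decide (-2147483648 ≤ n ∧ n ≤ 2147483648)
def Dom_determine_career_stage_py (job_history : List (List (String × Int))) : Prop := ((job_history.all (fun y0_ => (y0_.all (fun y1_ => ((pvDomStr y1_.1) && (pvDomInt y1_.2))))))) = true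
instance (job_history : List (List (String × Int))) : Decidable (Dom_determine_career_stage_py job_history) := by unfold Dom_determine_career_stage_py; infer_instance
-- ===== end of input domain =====

-- B maintains per-stage residual years instead of a total + if/elif chain; objective: alternative, same cost.

-- ===== PORT A =====
def determine_career_stage_py (job_history : List (List (String × Int))) : String :=
  let total_years : Int :=
    job_history.foldl (fun acc job => acc + (PySem.Dict.ofList job).getD "years" 0) 0
  if total_years < 3 then "Early Career"
  else if total_years < 8 then "Mid Career"
  else if total_years < 15 then "Senior"
  else "Expert"

-- ===== PORT B =====
def determine_career_stage_py_alt (job_history : List (List (String × Int))) : String :=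
  let remaining : List (String × Int) := [("Mid Career", 3), ("Senior", 8), ("Expert", 15)]
  let remaining := job_history.foldl
    (fun rem job =>
      let y : Int := (PySem.Dict.ofList job).getD "years" 0
      rem.map (fun p => (p.1, p.2 - y))) remaining
  remaining.foldl (fun label p => if p.2 ≤ 0 then p.1 else label) "Early Career"

-- ===== PRECONDITION & SPEC =====
def Spec_determine_career_stage_py (job_history : List (List (String × Int))) (out : String) : Prop := out = determine_career_stage_py_alt job_history
instance (job_history : List (List (String × Int))) (out : String) : Decidable (Spec_determine_career_stage_py job_history out) := by unfold Spec_determine_career_stage_py; infer_instance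

-- ===== CLAIM (what is proved, stated in full; the proofs are below) =====
def Claim_equal_determine_career_stage_py : Prop := ∀ (job_history : List (List (String × Int))), Dom_determine_career_stage_py job_history → Spec_determine_career_stage_py job_history (determine_career_stage_py job_history)

-- ===== LEMMAS AND PROOFS =====

-- Folding the years-sum from a start value a shifts the result by a.
theorem pv_acc_shift (t : List (List (String × Int))) :
    ∀ (a : Int),
      t.foldl (fun acc job => acc + (PySem.Dict.ofList job).getD "years" 0) a
      = a + t.foldl (fun acc job => acc + (PySem.Dict.ofList job).getD "years" 0) 0 := by
  induction t with
  | nil => intro a; simp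
  | cons u v ih =>
    intro a
    simp only [List.foldl_cons]
    rw [ih (a + _), ih ((0 : Int) + _)]
    ring

-- The residual fold applied to any start list subtracts the list's total years from every residual.
theorem pv_residual_fold (jh : List (List (String × Int))) :
    ∀ (L : List (String × Int)),
      jh.foldl
        (fun rem job =>
          let y : Int := (PySem.Dict.ofList job).getD "years" 0
          rem.map (fun p => (p.1, p.2 - y))) L
      = L.map (fun p => (p.1, p.2 - jh.foldl (fun acc job => acc + (PySem.Dict.ofList job).getD "years" 0) 0)) := by
  induction jh with
  | nil => intro L; simp
  | cons j t ih =>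
    intro L
    simp only [List.foldl_cons]
    rw [ih]
    simp only [List.map_map]
    apply List.map_congr_left
    intro p _
    simp only [Function.comp, Prod.mk.injEq, true_and]
    rw [pv_acc_shift t ((0:Int) + (PySem.Dict.ofList j).getD "years" 0)]
    ring

-- ===== VERDICT (by name: the statement is the Claim_ definition above) =====
theorem determine_career_stage_py_spec : Claim_equal_determine_career_stage_py := by
  intro jh _
  unfold Spec_determine_career_stage_py determine_career_stage_py determine_career_stage_py_alt
  simp only []
  rw [pv_residual_fold]
  set t : Int := jh.foldl (fun acc job => acc + (PySem.Dict.ofList job).getD "years" 0) 0 with ht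
  simp only [List.map_cons, List.map_nil, List.foldl_cons, List.foldl_nil]
  split_ifs <;> simp_all <;> omega
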